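-- pv_equiv track=rewrite | github.com/davidhonghikim/SuperSMM | _reorg/SuperSMM/src/core/processors/staff_detector.py | _group_staff_lines
-- ===== SOURCE A (Python) =====
-- from typing import List, Dict, Any, Optional, Tuple
--
-- def _group_staff_lines(
--     lines: List[List[int]], max_gap: int = 50
-- ) -> List[List[List[int]]]:
--     """
--     Group staff lines into staff systems.
--
--     Args:
--         lines (List[List[int]]): Detected horizontal lines
--         max_gap (int): Maximum vertical gap between lines in same staff
--
--     Returns:
--         List[List[List[int]]]: Grouped staff lines
--     """
--     if not lines:
--         return []
--
--     # Sort lines by y-coordinate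
--     sorted_lines = sorted(lines, key=lambda l: l[1])
--
--     # Group lines into staff systems
--     systems = [[sorted_lines[0]]]
--     for line in sorted_lines[1:]:
--         if line[1] - systems[-1][-1][1] > max_gap:
--             # Start new staff system
--             systems.append([line])
--         else:
--             # Add to current staff system
--             systems[-1].append(line)
--
--     return systems
-- ===== SOURCE B (Python) =====
-- def _group_staff_lines(lines, max_gap=50):
--     """Two staged passes: (1) find the boundary indices where a new system
--     starts (gap between consecutive sorted lines exceeds max_gap), then
--     (2) partition the sorted list by slicing between consecutive cuts."""
--     if not lines:
--         return []
--     s = sorted(lines, key=lambda l: l[1])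
--     bounds = [i for i in range(1, len(s)) if s[i][1] - s[i - 1][1] > max_gap]
--     cuts = [0] + bounds + [len(s)]
--     return [s[a:b] for a, b in zip(cuts, cuts[1:])]
-- ===== Notes on version B (the rewrite author's own statement) =====
-- stated objective: alternative
-- what changed: B replaces A's incremental pass that appends each line to the growing last group with a staged boundary-then-partition decomposition: it first computes the list of indices where the gap between consecutive sorted lines exceeds max_gap, then builds the result by slicing the sorted list between consecutive cut points.
import Mathlib
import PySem

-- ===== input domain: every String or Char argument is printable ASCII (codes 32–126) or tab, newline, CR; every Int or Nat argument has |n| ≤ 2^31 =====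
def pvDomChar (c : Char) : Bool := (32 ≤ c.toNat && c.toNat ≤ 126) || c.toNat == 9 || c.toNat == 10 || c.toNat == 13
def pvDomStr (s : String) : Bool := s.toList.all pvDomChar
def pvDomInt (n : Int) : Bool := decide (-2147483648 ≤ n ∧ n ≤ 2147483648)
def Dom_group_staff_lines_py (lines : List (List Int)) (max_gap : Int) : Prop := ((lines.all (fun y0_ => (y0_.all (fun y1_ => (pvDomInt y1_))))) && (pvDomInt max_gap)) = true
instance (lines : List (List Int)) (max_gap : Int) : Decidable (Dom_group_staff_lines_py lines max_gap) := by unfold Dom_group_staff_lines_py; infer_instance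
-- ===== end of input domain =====

-- B replaces A's incremental append-to-last-group pass with two staged passes:
-- boundary-index detection, then partition by slicing; objective: alternative.

-- ===== PORT A =====
-- the loop body of A: new system if the gap to systems[-1][-1] exceeds max_gap, else append to systems[-1]
def pvStepA (max_gap : Int) (systems : List (List (List Int))) (line : List Int) : List (List (List Int)) :=
  if PySem.List.pyGetD line 1 0 -
       PySem.List.pyGetD (PySem.List.pyGetD (PySem.List.pyGetD systems (-1) []) (-1) []) 1 0 > max_gap
  then systems ++ [[line]]
  else systems.dropLast ++ [PySem.List.pyGetD systems (-1) [] ++ [line]]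

def group_staff_lines_py (lines : List (List Int)) (max_gap : Int) : List (List (List Int)) :=
  if lines = [] then []
  else
    let sorted_lines := PySem.List.sorted lines (fun l => PySem.List.pyGetD l 1 0)
    (PySem.List.slice sorted_lines (some 1) none).foldl (pvStepA max_gap)
      [[PySem.List.pyGetD sorted_lines 0 []]]

-- ===== PORT B =====
def group_staff_lines_py_alt (lines : List (List Int)) (max_gap : Int) : List (List (List Int)) :=
  if lines = [] then []
  else
    let s := PySem.List.sorted lines (fun l => PySem.List.pyGetD l 1 0)
    let n : Int := s.length
    let bounds := (PySem.List.pyRange 1 n 1).filter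
      (fun i => decide (PySem.List.pyGetD (PySem.List.pyGetD s i []) 1 0 -
                        PySem.List.pyGetD (PySem.List.pyGetD s (i - 1) []) 1 0 > max_gap))
    let cuts := 0 :: bounds ++ [n]
    (cuts.zip cuts.tail).map (fun ab => PySem.List.slice s (some ab.1) (some ab.2))

-- ===== PRECONDITION & SPEC =====
-- Pre_ excludes exactly the inputs where Python A raises IndexError: some line has no index 1.
def Pre_group_staff_lines_py (lines : List (List Int)) (max_gap : Int) : Prop :=
  ∀ l ∈ lines, 2 ≤ l.length
instance (lines : List (List Int)) (max_gap : Int) : Decidable (Pre_group_staff_lines_py lines max_gap) := by unfold Pre_group_staff_lines_py; infer_instance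

def pvWitness_group_staff_lines_py : List (List Int) × Int := ([[0, 10], [0, 80], [0, 95]], 50)

def Spec_group_staff_lines_py (lines : List (List Int)) (max_gap : Int) (out : List (List (List Int))) : Prop := out = group_staff_lines_py_alt lines max_gap
instance (lines : List (List Int)) (max_gap : Int) (out : List (List (List Int))) : Decidable (Spec_group_staff_lines_py lines max_gap out) := by unfold Spec_group_staff_lines_py; infer_instance

-- ===== CLAIM (what is proved, stated in full; the proofs are below) =====
def Claim_equal_group_staff_lines_py : Prop := ∀ (lines : List (List Int)) (max_gap : Int), Dom_group_staff_lines_py lines max_gap → Pre_group_staff_lines_py lines max_gap → Spec_group_staff_lines_py lines max_gap (group_staff_lines_py lines max_gap)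

-- ===== LEMMAS AND PROOFS =====

-- specification of A's forward loop: pre++[p] is the (nonempty) last group, p the last line seen
def pvGo (max_gap : Int) (pre : List (List Int)) (p : List Int) :
    List (List Int) → List (List (List Int))
  | [] => [pre ++ [p]]
  | x :: xs =>
    if PySem.List.pyGetD x 1 0 - PySem.List.pyGetD p 1 0 > max_gap
    then (pre ++ [p]) :: pvGo max_gap [] x xs
    else pvGo max_gap (pre ++ [p]) x xs

-- specification of B's boundary comprehension: the break indices, counted from i
def pvBounds (max_gap : Int) (p : List Int) : List (List Int) → Int → List Int
  | [], _ => []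
  | x :: xs, i =>
    (if PySem.List.pyGetD x 1 0 - PySem.List.pyGetD p 1 0 > max_gap then [i] else []) ++
      pvBounds max_gap x xs (i + 1)

lemma pvStepA_eq (max_gap : Int) (acc : List (List (List Int))) (pre : List (List Int))
    (p x : List Int) :
    pvStepA max_gap (acc ++ [pre ++ [p]]) x =
      if PySem.List.pyGetD x 1 0 - PySem.List.pyGetD p 1 0 > max_gap
      then (acc ++ [pre ++ [p]]) ++ [[x]]
      else acc ++ [pre ++ [p] ++ [x]] := by
  unfold pvStepA
  rw [PySem.List.pyGetD_neg_one_append_singleton, PySem.List.pyGetD_neg_one_append_singleton]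
  split_ifs with h
  · rfl
  · simp

lemma pvFoldlA_eq_pvGo (max_gap : Int) (rest : List (List Int)) :
    ∀ (acc : List (List (List Int))) (pre : List (List Int)) (p : List Int),
      rest.foldl (pvStepA max_gap) (acc ++ [pre ++ [p]]) = acc ++ pvGo max_gap pre p rest := by
  induction rest with
  | nil => intro acc pre p; simp [pvGo]
  | cons x xs ih =>
    intro acc pre p
    simp only [List.foldl_cons, pvStepA_eq, pvGo]
    split_ifs with h
    · rw [show (acc ++ [pre ++ [p]]) ++ [[x]] = (acc ++ [pre ++ [p]]) ++ [[] ++ [x]] by simp,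
        ih (acc ++ [pre ++ [p]]) [] x]
      simp
    · rw [show acc ++ [pre ++ [p] ++ [x]] = acc ++ [(pre ++ [p]) ++ [x]] by simp,
        ih acc (pre ++ [p]) x]

-- phase 1 of B: the index comprehension computes pvBounds of the suffix after position k
lemma pvFilter_eq_pvBounds (max_gap : Int) :
    ∀ (t : List (List Int)) (p : List Int) (k : Nat) (s : List (List Int)),
      s.drop k = p :: t →
      (PySem.List.pyRange ((k : Int) + 1) (s.length : Int) 1).filter
        (fun i => decide (PySem.List.pyGetD (PySem.List.pyGetD s i []) 1 0 -
                          PySem.List.pyGetD (PySem.List.pyGetD s (i - 1) []) 1 0 > max_gap))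
        = pvBounds max_gap p t ((k : Int) + 1) := by
  intro t
  induction t with
  | nil =>
    intro p k s hdrop
    have hlen : s.length = k + 1 := by
      have := congrArg List.length hdrop
      simp [List.length_drop] at this
      omega
    rw [PySem.List.pyRange_one_eq_nil (by push_cast [hlen]; omega)]
    rfl
  | cons x xs ih =>
    intro p k s hdrop
    have hlen2 : k + 2 ≤ s.length := by
      have := congrArg List.length hdrop
      simp [List.length_drop] at this
      omega
    have hk1 : s[k + 1]? = some x := by
      have : s[k + 1]? = (s.drop k)[1]? := by
        rw [List.getElem?_drop]
      rw [this, hdrop]; rfl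
    have hk0 : s[k]? = some p := by
      have : s[k]? = (s.drop k)[0]? := by
        simp [List.getElem?_drop]
      rw [this, hdrop]; rfl
    have hdrop' : s.drop (k + 1) = x :: xs := by
      have : s.drop (k + 1) = (s.drop k).drop 1 := by
        rw [List.drop_drop]
      rw [this, hdrop]; rfl
    rw [PySem.List.pyRange_one_cons (by omega), List.filter_cons]
    have hge1 : PySem.List.pyGetD s ((k : Int) + 1) [] = x := by
      rw [show (k : Int) + 1 = ((k + 1 : Nat) : Int) by push_cast; ring,
        PySem.List.pyGetD_natCast, List.getD_eq_getElem?_getD, hk1]; rfl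
    have hge0 : PySem.List.pyGetD s ((k : Int) + 1 - 1) [] = p := by
      rw [show (k : Int) + 1 - 1 = ((k : Nat) : Int) by ring,
        PySem.List.pyGetD_natCast, List.getD_eq_getElem?_getD, hk0]; rfl
    have ihx := ih x (k + 1) s hdrop'
    rw [show ((k : Int) + 1) + 1 = ((k + 1 : Nat) : Int) + 1 by push_cast; ring, ihx]
    simp only [hge1, hge0, pvBounds]
    by_cases hb : PySem.List.pyGetD x 1 0 - PySem.List.pyGetD p 1 0 > max_gap
    · rw [if_pos (by simpa using hb), if_pos hb]
      push_cast
      rfl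
    · rw [if_neg (by simpa using hb), if_neg hb]
      push_cast
      rfl

-- phase 2 of B: slicing between consecutive cuts rebuilds A's grouping
lemma pvSlices_eq_pvGo (max_gap : Int) :
    ∀ (t : List (List Int)) (p : List Int) (k a : Nat) (s : List (List Int)),
      a ≤ k → s.drop k = p :: t →
      ((((a : Int)) :: (pvBounds max_gap p t ((k : Int) + 1) ++ [(s.length : Int)])).zip
          (pvBounds max_gap p t ((k : Int) + 1) ++ [(s.length : Int)])).map
        (fun ab => PySem.List.slice s (some ab.1) (some ab.2))
      = pvGo max_gap ((s.drop a).take (k - a)) p t := by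
  intro t
  induction t with
  | nil =>
    intro p k a s hak hdrop
    have hlen : s.length = k + 1 := by
      have := congrArg List.length hdrop
      simp [List.length_drop] at this
      omega
    have hsplit : s.drop a = (s.drop a).take (k - a) ++ [p] := by
      conv_lhs => rw [← List.take_append_drop (k - a) (s.drop a)]
      rw [List.drop_drop, show a + (k - a) = k by omega, hdrop]
    simp only [pvBounds, List.nil_append, List.zip_cons_cons, List.zip_nil_right,
      List.map_cons, List.map_nil, pvGo]
    rw [PySem.List.slice_natCast, hlen, show k + 1 - a = (k - a) + 1 by omega]
    rw [show ((s.drop a).take (k - a + 1)) = s.drop a from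
      List.take_of_length_le (by simp [List.length_drop]; omega)]
    conv_lhs => rw [hsplit]
  | cons x xs ih =>
    intro p k a s hak hdrop
    have hk0 : s[k]? = some p := by
      have : s[k]? = (s.drop k)[0]? := by simp [List.getElem?_drop]
      rw [this, hdrop]; rfl
    have hdrop' : s.drop (k + 1) = x :: xs := by
      have : s.drop (k + 1) = (s.drop k).drop 1 := by rw [List.drop_drop]
      rw [this, hdrop]; rfl
    have hpre : (s.drop a).take (k + 1 - a) = (s.drop a).take (k - a) ++ [p] := by
      rw [show k + 1 - a = (k - a) + 1 by omega, List.take_add_one, List.getElem?_drop,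
        show a + (k - a) = k by omega, hk0]
      rfl
    simp only [pvBounds, pvGo]
    by_cases hb : PySem.List.pyGetD x 1 0 - PySem.List.pyGetD p 1 0 > max_gap
    · rw [if_pos hb, if_pos hb]
      simp only [List.cons_append, List.nil_append, List.zip_cons_cons, List.map_cons]
      have ihx := ih x (k + 1) (k + 1) s (le_refl _) hdrop'
      rw [show ((k : Int) + 1) + 1 = ((k + 1 : Nat) : Int) + 1 by push_cast; ring] at *
      rw [show ((k : Int) + 1) = ((k + 1 : Nat) : Int) by push_cast; ring]
      rw [ihx, Nat.sub_self, List.take_zero]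
      congr 1
      rw [PySem.List.slice_natCast, hpre]
    · rw [if_neg hb, if_neg hb]
      simp only [List.nil_append]
      have ihx := ih x (k + 1) a s (by omega) hdrop'
      rw [show ((k : Int) + 1) + 1 = ((k + 1 : Nat) : Int) + 1 by push_cast; ring] at *
      rw [ihx, hpre]

-- ===== VERDICT (by name: the statement is the Claim_ definition above) =====
theorem group_staff_lines_py_spec : Claim_equal_group_staff_lines_py := by
  intro lines max_gap _ _
  unfold Spec_group_staff_lines_py group_staff_lines_py group_staff_lines_py_alt
  by_cases hnil : lines = []
  · simp [hnil]
  · rw [if_neg hnil, if_neg hnil]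
    have hperm := PySem.List.sorted_perm lines (fun l => PySem.List.pyGetD l 1 0) false
    have hs : PySem.List.sorted lines (fun l => PySem.List.pyGetD l 1 0) ≠ [] := by
      intro h
      exact hnil (List.perm_nil.mp ((h ▸ hperm).symm))
    obtain ⟨s0, rest, hsr⟩ := List.exists_cons_of_ne_nil hs
    simp only [hsr, PySem.List.slice_from_one, List.tail_cons, PySem.List.pyGetD_zero_cons]
    have hA := pvFoldlA_eq_pvGo max_gap rest [] [] s0
    simp only [List.nil_append] at hA
    rw [hA]
    have hdrop0 : (s0 :: rest).drop 0 = s0 :: rest := rfl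
    have hF := pvFilter_eq_pvBounds max_gap rest s0 0 (s0 :: rest) hdrop0
    have hS := pvSlices_eq_pvGo max_gap rest s0 0 0 (s0 :: rest) (le_refl _) hdrop0
    simp only [Nat.cast_zero, zero_add, Nat.sub_self, List.drop_zero, List.take_zero] at hF hS
    rw [hF]
    exact hS.symm
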